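-- pv_equiv track=rewrite | github.com/MarwahAlaofi/acm-proceedings | validation/checks.py | normalize_email_domain
-- ===== SOURCE A (Python) =====
-- def normalize_email_domain(domain):
--     """
--     Normalize email domain for comparison.
--
--     Treats student subdomains as equivalent to main domain:
--     - student.rmit.edu.au -> rmit.edu.au
--     - student.unimelb.edu.au -> unimelb.edu.au
--     - mail.neu.edu.cn -> neu.edu.cn
--     - connect.ust.hk -> ust.hk
--
--     Args:
--         domain: Email domain string (e.g., "student.rmit.edu.au")
--
--     Returns:
--         str: Normalized domain
--     """
--     if not domain:
--         return domain
--
--     # Common subdomain prefixes that should be normalized to main domain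
--     subdomain_prefixes = [
--         'student.', 'mail.', 'connect.', 'alumni.', 'staff.',
--         'students.', 'email.', 'webmail.', 'my.', 'campus.'
--     ]
--
--     for prefix in subdomain_prefixes:
--         if domain.startswith(prefix):
--             return domain[len(prefix):]
--
--     return domain
-- ===== SOURCE B (Python) =====
-- SUBDOMAIN_LABELS = {
--     'student', 'mail', 'connect', 'alumni', 'staff',
--     'students', 'email', 'webmail', 'my', 'campus',
-- }
--
--
-- def normalize_email_domain(domain):
--     if not domain:
--         return domain
--     head, sep, tail = domain.partition('.')
--     if sep and head in SUBDOMAIN_LABELS: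
--         return tail
--     return domain
-- ===== Notes on version B (the rewrite author's own statement) =====
-- stated objective: idiomatic
-- what changed: Replaces the loop over ten dotted subdomain prefixes (each doing its own startswith scan) with a single partition at the first dot plus one set-membership test on the bare first label.
import Mathlib
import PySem

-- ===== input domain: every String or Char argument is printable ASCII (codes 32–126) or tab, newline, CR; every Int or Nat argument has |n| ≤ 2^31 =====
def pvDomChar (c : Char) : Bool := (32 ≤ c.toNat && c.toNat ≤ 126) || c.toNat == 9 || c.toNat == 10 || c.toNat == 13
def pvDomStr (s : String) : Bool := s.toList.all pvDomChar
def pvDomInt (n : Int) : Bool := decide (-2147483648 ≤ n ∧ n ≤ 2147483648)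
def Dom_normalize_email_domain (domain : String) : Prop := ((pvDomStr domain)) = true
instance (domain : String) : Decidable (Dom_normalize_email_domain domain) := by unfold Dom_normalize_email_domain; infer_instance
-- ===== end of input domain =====

-- B replaces A's loop of ten dotted-prefix startswith tests with one partition at the first
-- dot plus a set-membership test on the bare first label (idiomatic rewrite).

-- ===== PORT A =====
def pvPrefixesA : List (List Char) :=
  ["student.".toList, "mail.".toList, "connect.".toList, "alumni.".toList, "staff.".toList,
   "students.".toList, "email.".toList, "webmail.".toList, "my.".toList, "campus.".toList]

-- 'for prefix in subdomain_prefixes: if domain.startswith(prefix): return domain[len(prefix):]'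
def pvLoopA (d : List Char) : List (List Char) → Option (List Char)
  | [] => none
  | p :: ps =>
      if PySem.Chars.startswith d p = true then
        some (PySem.List.slice d (some (PySem.List.len p)) none)
      else pvLoopA d ps

def normalize_email_domain (domain : String) : String :=
  if domain = "" then domain
  else
    match pvLoopA domain.toList pvPrefixesA with
    | some r => String.ofList r
    | none => domain

-- ===== PORT B =====
def pvLabelsB : List (List Char) :=
  ["student".toList, "mail".toList, "connect".toList, "alumni".toList, "staff".toList,
   "students".toList, "email".toList, "webmail".toList, "my".toList, "campus".toList]

def normalize_email_domain_alt (domain : String) : String :=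
  if domain = "" then domain
  else
    -- head, sep, tail = domain.partition('.') : split at the FIRST '.' (exact: find is the first occurrence)
    let d := domain.toList
    let i := PySem.Chars.find d ['.']
    if i = -1 then domain            -- sep == '' : no dot in domain
    else if d.take i.toNat ∈ pvLabelsB then String.ofList (d.drop (i.toNat + 1))
    else domain

-- ===== PRECONDITION & SPEC =====
def Spec_normalize_email_domain (domain : String) (out : String) : Prop := out = normalize_email_domain_alt domain
instance (domain : String) (out : String) : Decidable (Spec_normalize_email_domain domain out) := by unfold Spec_normalize_email_domain; infer_instance

-- ===== CLAIM (what is proved, stated in full; the proofs are below) =====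
def Claim_equal_normalize_email_domain : Prop := ∀ (domain : String), Dom_normalize_email_domain domain → Spec_normalize_email_domain domain (normalize_email_domain domain)

-- ===== LEMMAS AND PROOFS =====

-- a dot-free block before a '.' is determined: l ++ '.'::u = h ++ '.'::t forces l = h
theorem pv_dotfree_unique (l : List Char) : ∀ (h u t : List Char), '.' ∉ l → '.' ∉ h →
    l ++ '.' :: u = h ++ '.' :: t → l = h := by
  induction l with
  | nil => intro h u t _ hh he; cases h with
    | nil => rfl
    | cons b h' => simp at he hh; exact absurd he.1 hh.1
  | cons a l' ih =>
    intro h u t hl hh he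
    cases h with
    | nil => simp at he hl; exact absurd he.1.symm hl.1
    | cons b h' =>
      simp only [List.cons_append, List.cons.injEq] at he
      obtain ⟨rfl, he⟩ := he
      rw [ih h' u t (by simp_all) (by simp_all) he]

-- startswith against a dotted prefix, on a string partitioned at its first dot, decides head = label
theorem pv_match_iff (h t l : List Char) (hl : '.' ∉ l) (hh : '.' ∉ h) :
    PySem.Chars.startswith (h ++ '.' :: t) (l ++ ['.']) = decide (h = l) := by
  by_cases he : h = l
  · subst he
    have hp : (h ++ ['.']) <+: h ++ '.' :: t := ⟨t, by simp⟩
    simp [(PySem.Chars.startswith_iff _ _).mpr hp]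
  · simp only [he, decide_false]
    by_contra hcon
    have hb : PySem.Chars.startswith (h ++ '.' :: t) (l ++ ['.']) = true := by
      cases hx : PySem.Chars.startswith (h ++ '.' :: t) (l ++ ['.']) <;> simp_all
    obtain ⟨u, hu⟩ := (PySem.Chars.startswith_iff _ _).mp hb
    exact he (pv_dotfree_unique l h u t hl hh (by simpa [List.append_assoc] using hu)).symm

-- no prefix containing '.' matches a dot-free string
theorem pv_nodot (d p : List Char) (hd : '.' ∉ d) (hp : '.' ∈ p) :
    PySem.Chars.startswith d p = false := by
  by_contra hcon
  have hb : PySem.Chars.startswith d p = true := by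
    cases hx : PySem.Chars.startswith d p <;> simp_all
  exact hd (((PySem.Chars.startswith_iff _ _).mp hb).sublist.mem hp)

-- partition at the first dot: find decomposes d with a dot-free head
theorem pv_decomp (d : List Char) (hge : 0 ≤ PySem.Chars.find d ['.']) :
    d = d.take (PySem.Chars.find d ['.']).toNat ++ '.' :: d.drop ((PySem.Chars.find d ['.']).toNat + 1)
      ∧ '.' ∉ d.take (PySem.Chars.find d ['.']).toNat := by
  obtain ⟨h1, h2⟩ := PySem.Chars.find_spec (s := d) (sub := ['.']) hge
  set n := (PySem.Chars.find d ['.']).toNat with hn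
  obtain ⟨u, hu⟩ := h1
  have hdrop : d.drop n = '.' :: u := by simpa using hu.symm
  have hdrop1 : d.drop (n + 1) = u := by
    rw [← List.tail_drop, hdrop]; rfl
  constructor
  · calc d = d.take n ++ d.drop n := (List.take_append_drop n d).symm
      _ = d.take n ++ '.' :: d.drop (n + 1) := by rw [hdrop, hdrop1]
  · intro hmem
    obtain ⟨j, hj, hje⟩ := List.getElem_of_mem hmem
    have hjn : j < n := by simp [List.length_take] at hj; omega
    have hjd : j < d.length := by
      have hnd : n < d.length := by
        by_contra hnd
        have : d.drop n = [] := List.drop_eq_nil_of_le (by omega)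
        simp [this] at hdrop
      omega
    apply h2 j hjn
    rw [List.getElem_take] at hje
    rw [List.drop_eq_getElem_cons hjd, hje]
    simp

-- A's prefix loop on h ++ '.'::t agrees with B's membership test on h
theorem pv_chain (h t : List Char) (hfree : '.' ∉ h) (domain : String) :
    (match pvLoopA (h ++ '.' :: t) pvPrefixesA with
     | some r => String.ofList r
     | none => domain) = if h ∈ pvLabelsB then String.ofList t else domain := by
  have hmatch : ∀ l : List Char, '.' ∉ l →
      PySem.Chars.startswith (h ++ '.' :: t) (l ++ ['.']) = decide (h = l) :=
    fun l hl => pv_match_iff h t l hl hfree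
  have hdropl : ∀ l : List Char, l = h →
      PySem.List.slice (h ++ '.' :: t) (some (PySem.List.len (l ++ ['.']))) none = t := by
    rintro l rfl
    have hlen : PySem.List.len (l ++ ['.']) = (((l ++ ['.']).length : Nat) : Int) := by simp
    rw [hlen, PySem.List.slice_from_natCast,
        show l ++ '.' :: t = (l ++ ['.']) ++ t from by simp]
    exact List.drop_left
  simp only [pvLoopA, pvPrefixesA, pvLabelsB, List.mem_cons, List.not_mem_nil, or_false]
  rw [show ("student.".toList) = "student".toList ++ ['.'] from by decide,
      show ("mail.".toList) = "mail".toList ++ ['.'] from by decide,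
      show ("connect.".toList) = "connect".toList ++ ['.'] from by decide,
      show ("alumni.".toList) = "alumni".toList ++ ['.'] from by decide,
      show ("staff.".toList) = "staff".toList ++ ['.'] from by decide,
      show ("students.".toList) = "students".toList ++ ['.'] from by decide,
      show ("email.".toList) = "email".toList ++ ['.'] from by decide,
      show ("webmail.".toList) = "webmail".toList ++ ['.'] from by decide,
      show ("my.".toList) = "my".toList ++ ['.'] from by decide,
      show ("campus.".toList) = "campus".toList ++ ['.'] from by decide]
  rw [hmatch "student".toList (by decide),
      hmatch "mail".toList (by decide),
      hmatch "connect".toList (by decide),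
      hmatch "alumni".toList (by decide),
      hmatch "staff".toList (by decide),
      hmatch "students".toList (by decide),
      hmatch "email".toList (by decide),
      hmatch "webmail".toList (by decide),
      hmatch "my".toList (by decide),
      hmatch "campus".toList (by decide)]
  by_cases hmem : h = "student".toList ∨ h = "mail".toList ∨ h = "connect".toList ∨
      h = "alumni".toList ∨ h = "staff".toList ∨ h = "students".toList ∨ h = "email".toList ∨
      h = "webmail".toList ∨ h = "my".toList ∨ h = "campus".toList
  · rcases hmem with rfl | rfl | rfl | rfl | rfl | rfl | rfl | rfl | rfl | rfl <;>
      rw [hdropl _ rfl] <;> simp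
  · push Not at hmem
    obtain ⟨n1, n2, n3, n4, n5, n6, n7, n8, n9, n10⟩ := hmem
    simp_all

-- ===== VERDICT (by name: the statement is the Claim_ definition above) =====
theorem normalize_email_domain_spec : Claim_equal_normalize_email_domain := by
  intro domain _
  unfold Spec_normalize_email_domain normalize_email_domain normalize_email_domain_alt
  by_cases h0 : domain = ""
  · simp [h0]
  · simp only [h0, if_false]
    by_cases hni : PySem.Chars.find domain.toList ['.'] = -1
    · -- no dot anywhere: no "label." prefix can match, both sides return domain
      have hmem : '.' ∉ domain.toList := by
        intro hm
        obtain ⟨s1, s2, he⟩ := List.append_of_mem hm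
        exact ((PySem.Chars.find_eq_neg_one_iff _ ['.']).mp hni) ⟨s1, s2, by rw [he]; simp⟩
      simp only [pvLoopA, pvPrefixesA]
      rw [pv_nodot domain.toList "student.".toList hmem (by decide),
      pv_nodot domain.toList "mail.".toList hmem (by decide),
      pv_nodot domain.toList "connect.".toList hmem (by decide),
      pv_nodot domain.toList "alumni.".toList hmem (by decide),
      pv_nodot domain.toList "staff.".toList hmem (by decide),
      pv_nodot domain.toList "students.".toList hmem (by decide),
      pv_nodot domain.toList "email.".toList hmem (by decide),
      pv_nodot domain.toList "webmail.".toList hmem (by decide),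
      pv_nodot domain.toList "my.".toList hmem (by decide),
      pv_nodot domain.toList "campus.".toList hmem (by decide)]
      simp [hni]
    · have hge : 0 ≤ PySem.Chars.find domain.toList ['.'] := by
        have := PySem.Chars.neg_one_le_find domain.toList ['.']
        omega
      obtain ⟨hsplit, hfree⟩ := pv_decomp domain.toList hge
      simp only [hni, if_false]
      calc (match pvLoopA domain.toList pvPrefixesA with
            | some r => String.ofList r
            | none => domain)
          = (match pvLoopA (domain.toList.take (PySem.Chars.find domain.toList ['.']).toNat ++
                '.' :: domain.toList.drop ((PySem.Chars.find domain.toList ['.']).toNat + 1)) pvPrefixesA with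
            | some r => String.ofList r
            | none => domain) := by rw [← hsplit]
        _ = _ := by
            rw [pv_chain _ _ hfree domain]
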